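-- pv_equiv track=rewrite | github.com/jcdeargaez/juan_argaez_test | version.py | extract_version_parts
-- ===== SOURCE A (Python) =====
-- from typing import Generator, Tuple
--
-- def extract_version_parts(v: str) -> Generator[Tuple[str, bool], None, None]:
--     """
--     Yields the next version part, also an integer type indicator.
--     A version part is a sequence of alnum characters until the next non alnum character.
--     For example: 123.12-1 has three parts (123, 12, 1).
--     :param v: String version value.
--     :return: Generator of version parts with its int indicator (1 if it is, 0 otherwise)
--     """
--     if v is not None:
--         numeric = True
--         i = 0
--         for j in range(len(v) + 1):
--             if j < len(v) and v[j].isalpha():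
--                 numeric = False
--             if j == len(v) or not v[j].isalnum():
--                 if i < j:
--                     yield v[i:j], numeric
--                     numeric = True
--                 i = j + 1
-- ===== SOURCE B (Python) =====
-- from typing import Generator, Tuple
--
-- def extract_version_parts(v: str) -> Generator[Tuple[str, bool], None, None]:
--     """Single pass over the characters, accumulating the current alnum run in a
--     buffer and computing the numeric flag per part, instead of tracking start/end
--     indices over range(len(v)+1)."""
--     if v is not None:
--         part = []
--         for c in v:
--             if c.isalnum():
--                 part.append(c)
--             elif part:
--                 yield ''.join(part), not any(ch.isalpha() for ch in part)
--                 part = []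
--         if part:
--             yield ''.join(part), not any(ch.isalpha() for ch in part)
-- ===== Notes on version B (the rewrite author's own statement) =====
-- stated objective: simpler
-- what changed: Replaces the index-pair scan over range(len(v)+1) with a single pass that accumulates each alnum run in a buffer and computes the numeric flag per part from the buffer itself, removing the i/j index bookkeeping and the carried numeric state.
import Mathlib
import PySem

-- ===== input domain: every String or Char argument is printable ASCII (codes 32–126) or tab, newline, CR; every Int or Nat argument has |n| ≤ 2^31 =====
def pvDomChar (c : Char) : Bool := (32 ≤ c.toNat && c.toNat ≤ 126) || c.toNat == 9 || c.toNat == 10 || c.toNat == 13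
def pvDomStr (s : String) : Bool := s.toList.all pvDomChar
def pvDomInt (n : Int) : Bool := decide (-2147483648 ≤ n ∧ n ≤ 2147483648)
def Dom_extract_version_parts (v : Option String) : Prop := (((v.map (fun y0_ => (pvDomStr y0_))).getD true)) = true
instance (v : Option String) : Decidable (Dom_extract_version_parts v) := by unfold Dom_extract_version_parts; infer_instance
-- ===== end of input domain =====

-- B replaces A's index-pair scan with a single buffer-accumulating pass; objective: simpler.

-- ===== PORT A =====
-- Loop state: (yielded parts so far, numeric, i); j runs over range(len(v)+1).
def pvStepA (cs : List Char) (st : List (String × Bool) × Bool × Nat) (j : Nat) :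
    List (String × Bool) × Bool × Nat :=
  let acc := st.1
  let numeric := st.2.1
  let i := st.2.2
  let numeric := if j < cs.length ∧ PySem.Chars.isalpha (cs.getD j ' ') then false else numeric
  if j = cs.length ∨ ¬ PySem.Chars.isalnum (cs.getD j ' ') then
    if i < j then
      (acc ++ [(String.mk (PySem.List.slice cs (some (i : Int)) (some (j : Int))), numeric)], true, j + 1)
    else
      (acc, numeric, j + 1)
  else
    (acc, numeric, i)

def extract_version_parts (v : Option String) : List (String × Bool) :=
  match v with
  | none => []
  | some s =>
    let cs := s.toList
    ((List.range (cs.length + 1)).foldl (pvStepA cs) ([], true, 0)).1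

-- ===== PORT B =====
-- ''.join(part), not any(ch.isalpha() for ch in part)
def pvEmit (buf : List Char) : String × Bool :=
  (String.mk buf, !buf.any PySem.Chars.isalpha)

def pvGoB : List Char → List Char → List (String × Bool)
  | [], buf => if buf.isEmpty then [] else [pvEmit buf]
  | c :: rest, buf =>
    if PySem.Chars.isalnum c then pvGoB rest (buf ++ [c])
    else if buf.isEmpty then pvGoB rest buf
    else pvEmit buf :: pvGoB rest []

def extract_version_parts_alt (v : Option String) : List (String × Bool) :=
  match v with
  | none => []
  | some s => pvGoB s.toList []

-- ===== PRECONDITION & SPEC =====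
def Spec_extract_version_parts (v : Option String) (out : List (String × Bool)) : Prop := out = extract_version_parts_alt v
instance (v : Option String) (out : List (String × Bool)) : Decidable (Spec_extract_version_parts v out) := by unfold Spec_extract_version_parts; infer_instance

-- ===== CLAIM (what is proved, stated in full; the proofs are below) =====
def Claim_equal_extract_version_parts : Prop := ∀ (v : Option String), Dom_extract_version_parts v → Spec_extract_version_parts v (extract_version_parts v)

-- ===== LEMMAS AND PROOFS =====

theorem pv_isalpha_isalnum (c : Char) (h : PySem.Chars.isalpha c = true) :
    PySem.Chars.isalnum c = true := by
  simp [PySem.Chars.isalnum, h]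

-- One step of A's loop at a separator position (j = len or v[j] not alnum).
theorem pvStepA_sep (cs : List Char) (j : Nat) (acc : List (String × Bool)) (num : Bool) (i : Nat)
    (hsep : j = cs.length ∨ ¬ PySem.Chars.isalnum (cs.getD j ' ') = true)
    (halpha : ¬ (j < cs.length ∧ PySem.Chars.isalpha (cs.getD j ' ') = true)) :
    pvStepA cs (acc, num, i) j =
      if i < j then
        (acc ++ [(String.mk (PySem.List.slice cs (some (i : Int)) (some (j : Int))), num)], true, j + 1)
      else (acc, num, j + 1) := by
  unfold pvStepA
  dsimp only
  rw [if_neg halpha, if_pos hsep]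

-- One step of A's loop at an alnum position.
theorem pvStepA_alnum (cs : List Char) (j : Nat) (acc : List (String × Bool)) (num : Bool) (i : Nat)
    (hlt : j < cs.length) (hc : PySem.Chars.isalnum (cs.getD j ' ') = true) :
    pvStepA cs (acc, num, i) j =
      (acc, if PySem.Chars.isalpha (cs.getD j ' ') then false else num, i) := by
  unfold pvStepA
  dsimp only
  rw [if_neg (not_or.mpr ⟨fun h => absurd h (by omega), fun h => h hc⟩)]
  simp [hlt]

-- Invariant: folding A's step from index j with buffer cs[i:j] carried as (numeric, i)
-- yields acc ++ what B produces on the remaining suffix with that buffer.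
theorem pv_loop (cs : List Char) :
    ∀ m j i acc, j ≤ cs.length → cs.length + 1 - j = m → i ≤ j →
      (((List.range' j m).foldl (pvStepA cs) (acc, !((cs.drop i).take (j - i)).any PySem.Chars.isalpha, i)).1
        = acc ++ pvGoB (cs.drop j) ((cs.drop i).take (j - i))) := by
  intro m
  induction m with
  | zero => intro j i acc hj hm hi; omega
  | succ m ih =>
    intro j i acc hj hm hi
    have hbuflen : ((cs.drop i).take (j - i)).length = j - i := by
      simp [List.length_take, List.length_drop]; omega
    rw [List.range'_succ, List.foldl_cons]
    by_cases hjn : j = cs.length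
    · -- last iteration: j = len(v)
      subst hjn
      have hm0 : m = 0 := by omega
      subst hm0
      have hdrop : cs.drop cs.length = [] := by simp
      rw [pvStepA_sep cs cs.length _ _ _ (Or.inl rfl) (by simp)]
      by_cases hij : i < cs.length
      · have hne : ((cs.drop i).take (cs.length - i)).isEmpty = false := by
          rw [List.isEmpty_eq_false_iff, ← List.length_pos_iff, hbuflen]; omega
        rw [if_pos hij]
        simp only [hdrop, pvGoB, hne, Bool.false_eq_true, if_false, pvEmit]
        have hsl : PySem.List.slice cs (some (i : Int)) (some (cs.length : Int))
            = (cs.drop i).take (cs.length - i) := PySem.List.slice_natCast cs i cs.length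
        simp [hsl]
      · have hii : i = cs.length := by omega
        subst hii
        simp [pvGoB, hdrop]
    · -- j < len(v)
      have hjlt : j < cs.length := by omega
      have hget : cs.getD j ' ' = cs[j] := List.getD_eq_getElem cs ' ' hjlt
      have hdropj : cs.drop j = cs[j] :: cs.drop (j + 1) := List.drop_eq_getElem_cons hjlt
      by_cases hc : PySem.Chars.isalnum cs[j]
      · -- alnum: buffer grows
        have hbuf' : (cs.drop i).take (j + 1 - i) = (cs.drop i).take (j - i) ++ [cs[j]] := by
          have h1 : j + 1 - i = (j - i) + 1 := by omega
          rw [h1, List.take_add_one]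
          have h2 : (cs.drop i)[j - i]? = some cs[j] := by
            rw [List.getElem?_drop]
            have h3 : i + (j - i) = j := by omega
            rw [h3, List.getElem?_eq_getElem hjlt]
          simp [h2]
        have hnum : (if PySem.Chars.isalpha cs[j] then false
              else !((cs.drop i).take (j - i)).any PySem.Chars.isalpha)
            = !((cs.drop i).take (j + 1 - i)).any PySem.Chars.isalpha := by
          rw [hbuf']
          by_cases ha : PySem.Chars.isalpha cs[j] <;> simp [ha]
        rw [pvStepA_alnum cs j _ _ _ hjlt (by rw [hget]; exact hc), hget, hnum,
          ih (j + 1) i acc (by omega) (by omega) (by omega), hdropj]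
        rw [show pvGoB (cs[j] :: cs.drop (j + 1)) ((cs.drop i).take (j - i))
            = pvGoB (cs.drop (j + 1)) ((cs.drop i).take (j - i) ++ [cs[j]]) by
          simp [pvGoB, hc]]
        rw [hbuf']
      · -- separator
        have ha : PySem.Chars.isalpha cs[j] = false := by
          by_contra h
          exact hc (pv_isalpha_isalnum _ (by revert h; simp))
        rw [pvStepA_sep cs j _ _ _ (Or.inr (by rw [hget]; simpa using hc))
          (by rw [hget]; simp [ha])]
        by_cases hij : i < j
        · have hne : ((cs.drop i).take (j - i)).isEmpty = false := by
            rw [List.isEmpty_eq_false_iff, ← List.length_pos_iff, hbuflen]; omega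
          rw [if_pos hij]
          have ih' := ih (j + 1) (j + 1)
            (acc ++ [(String.mk (PySem.List.slice cs (some (i:Int)) (some (j:Int))),
              !((cs.drop i).take (j - i)).any PySem.Chars.isalpha)]) (by omega) (by omega) (le_refl _)
          simp only [Nat.sub_self, List.take_zero] at ih'
          rw [show (!List.any [] PySem.Chars.isalpha) = true from rfl] at ih'
          rw [ih', hdropj]
          simp only [pvGoB, hc, Bool.false_eq_true, if_false, hne, pvEmit]
          have hsl : PySem.List.slice cs (some (i : Int)) (some (j : Int))
              = (cs.drop i).take (j - i) := PySem.List.slice_natCast cs i j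
          simp [hsl]
        · rw [if_neg hij]
          have hz : j - i = 0 := by omega
          have ih' := ih (j + 1) (j + 1) acc (by omega) (by omega) (le_refl _)
          simp only [Nat.sub_self, List.take_zero] at ih'
          rw [show (!List.any [] PySem.Chars.isalpha) = true from rfl] at ih'
          simp only [hz, List.take_zero]
          rw [show (!List.any [] PySem.Chars.isalpha) = true from rfl, ih', hdropj]
          simp [pvGoB, hc]

theorem extract_version_parts_spec : Claim_equal_extract_version_parts := by
  intro v _
  unfold Spec_extract_version_parts extract_version_parts extract_version_parts_alt
  cases v with
  | none => rfl
  | some s =>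
    simp only
    have h := pv_loop s.toList (s.toList.length + 1) 0 0 [] (by omega) (by omega) (by omega)
    simpa [List.range_eq_range'] using h
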